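-- pv_equiv track=rewrite | github.com/IsaacAlfredo/frequencia-monitoria | frequencia_monitoria.py | day_names
-- ===== SOURCE A (Python) =====
-- def day_names(month):
--     monthdaysdic = {'segunda':[],'terça':[],'quarta':[],'quinta':[],'sexta':[],'sabado':[],'domingo':[]}
--
--     for week in month:
--         for day in range(len(week)):
--
--             if week[day] != 0:
--                 if day == 0:
--                     monthdaysdic['segunda'].append(week[day])
--                 elif day == 1:
--                     monthdaysdic['terça'].append(week[day])
--
--                 elif day == 2:
--                     monthdaysdic['quarta'].append(week[day])
--
--                 elif day == 3:
--                     monthdaysdic['quinta'].append(week[day])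
--
--                 elif day == 4:
--                     monthdaysdic['sexta'].append(week[day])
--
--                 elif day == 5:
--                     monthdaysdic['sabado'].append(week[day])
--                 elif day == 6:
--                     monthdaysdic['domingo'].append(week[day])
--     return monthdaysdic
-- ===== SOURCE B (Python) =====
-- def day_names(month):
--     names = ['segunda', 'terça', 'quarta', 'quinta', 'sexta', 'sabado', 'domingo']
--     return {name: [week[i] for week in month if i < len(week) and week[i] != 0]
--             for i, name in enumerate(names)}
-- ===== Notes on version B (the rewrite author's own statement) =====
-- stated objective: idiomatic
-- what changed: Replaced A's row-major interleaved pass with a per-element if-elif router mutating a dict by a single dict comprehension that builds each weekday's list column-major (one filtered comprehension pass over all weeks per weekday index).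
import Mathlib
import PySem

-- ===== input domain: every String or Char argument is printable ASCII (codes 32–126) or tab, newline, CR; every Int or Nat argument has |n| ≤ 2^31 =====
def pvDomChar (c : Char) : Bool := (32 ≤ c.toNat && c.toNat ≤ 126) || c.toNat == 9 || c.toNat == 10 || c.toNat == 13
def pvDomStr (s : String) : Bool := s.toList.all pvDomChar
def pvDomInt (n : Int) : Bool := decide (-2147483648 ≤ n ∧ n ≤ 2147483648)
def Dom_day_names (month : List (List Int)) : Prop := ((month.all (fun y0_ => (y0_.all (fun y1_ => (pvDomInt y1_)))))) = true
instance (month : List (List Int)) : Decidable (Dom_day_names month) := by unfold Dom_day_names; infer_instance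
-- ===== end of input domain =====

-- B rebuilds the same seven-key grouping as a dict comprehension traversed column-major (one filtered pass over the weeks per weekday) instead of A's row-major pass with an if-elif router; objective: idiomatic.


-- ===== PORT A =====
def pvInit : PySem.Dict String (List Int) :=
  PySem.Dict.ofList [("segunda", []), ("terça", []), ("quarta", []), ("quinta", []),
                     ("sexta", []), ("sabado", []), ("domingo", [])]

-- body of A's inner 'for day in range(len(week))' loop (the if-elif router)
def pvDayStep (week : List Int) (d : PySem.Dict String (List Int)) (day : Int) :
    PySem.Dict String (List Int) :=
  if PySem.List.pyGetD week day 0 ≠ 0 then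
    if day = 0 then d.modify "segunda" [] (· ++ [PySem.List.pyGetD week day 0])
    else if day = 1 then d.modify "terça" [] (· ++ [PySem.List.pyGetD week day 0])
    else if day = 2 then d.modify "quarta" [] (· ++ [PySem.List.pyGetD week day 0])
    else if day = 3 then d.modify "quinta" [] (· ++ [PySem.List.pyGetD week day 0])
    else if day = 4 then d.modify "sexta" [] (· ++ [PySem.List.pyGetD week day 0])
    else if day = 5 then d.modify "sabado" [] (· ++ [PySem.List.pyGetD week day 0])
    else if day = 6 then d.modify "domingo" [] (· ++ [PySem.List.pyGetD week day 0])
    else d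
  else d

def day_names (month : List (List Int)) : List (String × List Int) :=
  (month.foldl
    (fun d week => (PySem.List.pyRange 0 (week.length : Int)).foldl (pvDayStep week) d)
    pvInit).items

-- ===== PORT B =====
def pvNames : List String :=
  ["segunda", "terça", "quarta", "quinta", "sexta", "sabado", "domingo"]

-- [week[i] for week in month if i < len(week) and week[i] != 0]
def pvCol (month : List (List Int)) (i : Int) : List Int :=
  month.filterMap (fun week =>
    if i < (week.length : Int) ∧ PySem.List.pyGetD week i 0 ≠ 0
    then some (PySem.List.pyGetD week i 0) else none)

def day_names_alt (month : List (List Int)) : List (String × List Int) :=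
  (PySem.List.enumerate pvNames).map (fun p => (p.2, pvCol month p.1))

-- ===== PRECONDITION & SPEC =====
def Spec_day_names (month : List (List Int)) (out : List (String × List Int)) : Prop := out = day_names_alt month
instance (month : List (List Int)) (out : List (String × List Int)) : Decidable (Spec_day_names month out) := by unfold Spec_day_names; infer_instance

-- ===== CLAIM (what is proved, stated in full; the proofs are below) =====
def Claim_equal_day_names : Prop := ∀ (month : List (List Int)), Dom_day_names month → Spec_day_names month (day_names month)

-- ===== LEMMAS AND PROOFS =====

-- the seven-slot dict A's loop maintains
def pvMk (a0 a1 a2 a3 a4 a5 a6 : List Int) : PySem.Dict String (List Int) :=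
  PySem.Dict.mk [("segunda", a0), ("terça", a1), ("quarta", a2), ("quinta", a3),
                 ("sexta", a4), ("sabado", a5), ("domingo", a6)]

-- contribution of one week at weekday index j (B's comprehension body)
def pvR (w : List Int) (j : Nat) : List Int :=
  (if (j : Int) < (w.length : Int) ∧ PySem.List.pyGetD w (j : Int) 0 ≠ 0
   then some (PySem.List.pyGetD w (j : Int) 0) else none).toList

-- contribution of the first n indices of one week
def pvC (w : List Int) (j n : Nat) : List Int := if j < n then pvR w j else []

theorem pvC_succ (w : List Int) (j n : Nat) :
    pvC w j (n + 1) = pvC w j n ++ (if j = n then pvR w n else []) := by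
  unfold pvC
  by_cases h1 : j < n
  · rw [if_pos (by omega), if_pos h1, if_neg (by omega)]
    simp
  · by_cases h2 : j = n
    · subst h2
      rw [if_pos (by omega), if_neg h1, if_pos rfl]
      simp
    · rw [if_neg (by omega), if_neg h1, if_neg h2]
      simp

theorem pvC_len (w : List Int) (j : Nat) : pvC w j w.length = pvR w j := by
  unfold pvC
  split
  · rfl
  · unfold pvR
    rw [if_neg]
    · rfl
    · rintro ⟨h1, -⟩
      omega

theorem pv_filterMap_cons {a b : Type} (f : a → Option b) (x : a) (l : List a) :
    List.filterMap f (x :: l) = (f x).toList ++ List.filterMap f l := by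
  cases h : f x <;> simp [h]

theorem pvCol_cons (w : List Int) (rest : List (List Int)) (j : Nat) :
    pvCol (w :: rest) (j : Int) = pvR w j ++ pvCol rest (j : Int) := by
  rw [pvCol, pv_filterMap_cons]
  rfl

theorem pvDayStep_mk (w : List Int) (n : Nat) (a0 a1 a2 a3 a4 a5 a6 : List Int) :
    pvDayStep w (pvMk a0 a1 a2 a3 a4 a5 a6) (n : Int)
      = pvMk (a0 ++ if 0 = n then pvR w n else []) (a1 ++ if 1 = n then pvR w n else [])
             (a2 ++ if 2 = n then pvR w n else []) (a3 ++ if 3 = n then pvR w n else [])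
             (a4 ++ if 4 = n then pvR w n else []) (a5 ++ if 5 = n then pvR w n else [])
             (a6 ++ if 6 = n then pvR w n else []) := by
  by_cases hv : PySem.List.pyGetD w (n : Int) 0 = 0
  · have hr : pvR w n = [] := by simp [pvR, hv]
    simp [pvDayStep, hv, hr]
  · simp only [PySem.List.pyGetD_natCast, List.getD_eq_getElem?_getD] at hv
    have hlt : (n : Int) < (w.length : Int) := by
      by_contra h
      have hlen : w.length ≤ n := by omega
      exact hv (by simp [List.getElem?_eq_none hlen])
    have hr : pvR w n = [PySem.List.pyGetD w (n : Int) 0] := by simp [pvR, hlt, hv]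
    rcases Nat.lt_or_ge n 7 with h7 | h7
    · interval_cases n <;>
        simp [pvDayStep, hv, hr, pvMk, PySem.Dict.modify, PySem.List.pyGetD_ofNat',
          List.getD_eq_getElem?_getD] <;> rfl
    · simp [pvDayStep, hv,
        show ¬((n : Int) = 1) by omega, show ¬((n : Int) = 2) by omega,
        show ¬((n : Int) = 3) by omega, show ¬((n : Int) = 4) by omega,
        show ¬((n : Int) = 5) by omega, show ¬((n : Int) = 6) by omega,
        show ¬(0 = n) by omega, show ¬(1 = n) by omega, show ¬(2 = n) by omega,
        show ¬(3 = n) by omega, show ¬(4 = n) by omega, show ¬(5 = n) by omega,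
        show ¬(6 = n) by omega, show ¬(n = 0) by omega]

theorem pvInner (w : List Int) (n : Nat) :
    ∀ a0 a1 a2 a3 a4 a5 a6 : List Int,
    (PySem.List.pyRange 0 (n : Int)).foldl (pvDayStep w) (pvMk a0 a1 a2 a3 a4 a5 a6)
      = pvMk (a0 ++ pvC w 0 n) (a1 ++ pvC w 1 n) (a2 ++ pvC w 2 n) (a3 ++ pvC w 3 n)
             (a4 ++ pvC w 4 n) (a5 ++ pvC w 5 n) (a6 ++ pvC w 6 n) := by
  induction n with
  | zero =>
    intro a0 a1 a2 a3 a4 a5 a6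
    simp [pvC]
  | succ n ih =>
    intro a0 a1 a2 a3 a4 a5 a6
    rw [show ((n + 1 : Nat) : Int) = (n : Int) + 1 by push_cast; ring,
        PySem.List.pyRange_one_succ_right (by positivity), List.foldl_append]
    simp only [List.foldl_cons, List.foldl_nil, ih, pvDayStep_mk, pvC_succ, List.append_assoc]

theorem pvOuter (month : List (List Int)) :
    ∀ a0 a1 a2 a3 a4 a5 a6 : List Int,
    month.foldl
      (fun d week => (PySem.List.pyRange 0 (week.length : Int)).foldl (pvDayStep week) d)
      (pvMk a0 a1 a2 a3 a4 a5 a6)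
      = pvMk (a0 ++ pvCol month 0) (a1 ++ pvCol month 1) (a2 ++ pvCol month 2)
             (a3 ++ pvCol month 3) (a4 ++ pvCol month 4) (a5 ++ pvCol month 5)
             (a6 ++ pvCol month 6) := by
  induction month with
  | nil => intro a0 a1 a2 a3 a4 a5 a6; simp [pvCol]
  | cons w rest ih =>
    intro a0 a1 a2 a3 a4 a5 a6
    rw [List.foldl_cons, pvInner, ih]
    simp only [pvC_len]
    rw [show (0:Int) = ((0:Nat):Int) by norm_num, show (1:Int) = ((1:Nat):Int) by norm_num,
        show (2:Int) = ((2:Nat):Int) by norm_num, show (3:Int) = ((3:Nat):Int) by norm_num,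
        show (4:Int) = ((4:Nat):Int) by norm_num, show (5:Int) = ((5:Nat):Int) by norm_num,
        show (6:Int) = ((6:Nat):Int) by norm_num]
    simp only [pvCol_cons, List.append_assoc]

-- ===== VERDICT (by name: the statement is the Claim_ definition above) =====
theorem day_names_spec : Claim_equal_day_names := by
  intro month _
  unfold Spec_day_names day_names day_names_alt
  have hinit : pvInit = pvMk [] [] [] [] [] [] [] := rfl
  rw [hinit, pvOuter]
  rfl
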